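-- pv_equiv track=rewrite | github.com/avengerandy/leetcode | leetcode/981.TimeBasedKeyValueStore/01.py | getMostRecentTimestamp
-- ===== SOURCE A (Python) =====
-- def getMostRecentTimestamp(timestampList, target: int) -> int | None:
--     left, right = 0, len(timestampList) - 1
--
--     while left <= right:
--         mid = (left + right) // 2
--         value = timestampList[mid]
--         if value == target:
--             return target
--         elif value < target:
--             left = mid + 1
--         else:
--             right = mid - 1
--
--     if left == 0:
--         return None
--     return timestampList[left - 1]
-- ===== SOURCE B (Python) =====
-- def getMostRecentTimestamp(timestampList, target: int) -> int | None:
--     # Recursive binary search in (base, size) form over natural numbers: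
--     # instead of two converging pointers and a terminal list[left-1] read,
--     # it keeps the window start and its width and threads the best-so-far
--     # candidate (the value at the last "go right" step) as an accumulator.
--     def go(left, size, best):
--         if size == 0:
--             return best
--         half = (size - 1) // 2
--         value = timestampList[left + half]
--         if value == target:
--             return target
--         if value < target:
--             return go(left + half + 1, size - half - 1, value)
--         return go(left, half, best)
--     return go(0, len(timestampList), None)
-- ===== Notes on version B (the rewrite author's own statement) =====
-- stated objective: alternative
-- what changed: The iterative two-pointer binary search with a terminal timestampList[left-1] re-indexing is replaced by a recursive (window start, window width) search over naturals that threads a best-so-far accumulator, so there is no post-loop pointer inspection or second list access.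
import Mathlib
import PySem

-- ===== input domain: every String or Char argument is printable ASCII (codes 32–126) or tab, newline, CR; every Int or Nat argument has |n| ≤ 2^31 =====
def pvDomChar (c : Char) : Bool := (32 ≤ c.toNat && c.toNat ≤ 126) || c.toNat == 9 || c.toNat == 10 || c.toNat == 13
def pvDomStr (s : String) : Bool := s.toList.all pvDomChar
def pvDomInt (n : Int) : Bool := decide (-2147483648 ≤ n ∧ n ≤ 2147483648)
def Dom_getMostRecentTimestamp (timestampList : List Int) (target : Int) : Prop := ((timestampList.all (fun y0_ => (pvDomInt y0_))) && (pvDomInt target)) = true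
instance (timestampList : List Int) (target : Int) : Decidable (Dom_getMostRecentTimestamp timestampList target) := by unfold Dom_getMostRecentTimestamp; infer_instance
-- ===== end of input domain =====

-- B replaces A's iterative two-pointer search (with its terminal timestampList[left-1]
-- re-indexing) by a recursive (window start, window width) search over naturals that
-- threads a best-so-far accumulator; same return value.

-- ===== PORT A =====
-- A's while-loop over mutable Int pointers (left, right); the code after the loop reads
-- the final `left`, so it is the loop's exit branch.  `mid` is always in range when
-- called from the entry point, so `(pyGet? …).getD 0` is exact there.
def pvLoopA (timestampList : List Int) (target left right : Int) : Option Int :=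
  if left ≤ right then
    if (PySem.List.pyGet? timestampList (PySem.Int.floordiv (left + right) 2)).getD 0 = target then
      some target
    else if (PySem.List.pyGet? timestampList (PySem.Int.floordiv (left + right) 2)).getD 0 < target then
      pvLoopA timestampList target (PySem.Int.floordiv (left + right) 2 + 1) right
    else
      pvLoopA timestampList target left (PySem.Int.floordiv (left + right) 2 - 1)
  else if left = 0 then none
  else some ((PySem.List.pyGet? timestampList (left - 1)).getD 0)
termination_by (right + 1 - left).toNat
decreasing_by
  · have h := PySem.Int.floordiv_two_mid_bounds (by omega : left ≤ right); omega
  · have h := PySem.Int.floordiv_two_mid_bounds (by omega : left ≤ right); omega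

def getMostRecentTimestamp (timestampList : List Int) (target : Int) : Option Int :=
  pvLoopA timestampList target 0 (timestampList.length - 1)

-- ===== PORT B =====
-- Source B's inner `go(left, size, best)`: window start `left` and width `size` are
-- naturals, so the index `left + half` is always ≥ 0 and plain `List.getD` is exact.
def pvGoB (timestampList : List Int) (target : Int) (left size : Nat) (best : Option Int) : Option Int :=
  if size = 0 then best
  else
    let half := (size - 1) / 2
    let value := timestampList.getD (left + half) 0
    if value = target then some target
    else if value < target then
      pvGoB timestampList target (left + half + 1) (size - half - 1) (some value)
    else
      pvGoB timestampList target left half best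
termination_by size
decreasing_by all_goals omega

def getMostRecentTimestamp_alt (timestampList : List Int) (target : Int) : Option Int :=
  pvGoB timestampList target 0 timestampList.length none

-- ===== PRECONDITION & SPEC =====
def Spec_getMostRecentTimestamp (timestampList : List Int) (target : Int) (out : Option Int) : Prop := out = getMostRecentTimestamp_alt timestampList target
instance (timestampList : List Int) (target : Int) (out : Option Int) : Decidable (Spec_getMostRecentTimestamp timestampList target out) := by unfold Spec_getMostRecentTimestamp; infer_instance

-- ===== CLAIM (what is proved, stated in full; the proofs are below) =====
def Claim_equal_getMostRecentTimestamp : Prop := ∀ (timestampList : List Int) (target : Int), Dom_getMostRecentTimestamp timestampList target → Spec_getMostRecentTimestamp timestampList target (getMostRecentTimestamp timestampList target)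

-- ===== LEMMAS AND PROOFS =====
-- A's exit value as a function of the final `left`: this is exactly the accumulator B carries.
def pvExit (timestampList : List Int) (left : Int) : Option Int :=
  if left = 0 then none else some ((PySem.List.pyGet? timestampList (left - 1)).getD 0)

-- Both ports read a nonnegative index; out of range both yield the default 0.
lemma pvGet_nonneg (ts : List Int) (i : Int) (h : 0 ≤ i) :
    (PySem.List.pyGet? ts i).getD 0 = ts.getD i.toNat 0 := by
  rw [show (PySem.List.pyGet? ts i).getD 0 = PySem.List.pyGetD ts i 0 from by
        simp [PySem.List.pyGetD],
      PySem.List.pyGetD_of_nonneg ts 0 h]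

-- A's Int midpoint equals B's Nat midpoint under the pointer↔(start,width) correspondence.
lemma pvMid_eq (left right : Int) (h0 : 0 ≤ left) (hle : left ≤ right) :
    PySem.Int.floordiv (left + right) 2
      = ((left.toNat + ((right + 1 - left).toNat - 1) / 2 : Nat) : Int) := by
  have hc : left + right = ((left.toNat + right.toNat : Nat) : Int) := by
    push_cast; omega
  rw [hc, show ((2 : Int) = ((2 : Nat) : Int)) from rfl, PySem.Int.floordiv_natCast]
  have hL : (left.toNat : Int) = left := Int.toNat_of_nonneg h0
  have hR : (right.toNat : Int) = right := Int.toNat_of_nonneg (by omega)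
  have hs : ((right + 1 - left).toNat : Int) = right + 1 - left := Int.toNat_of_nonneg (by omega)
  have : (left.toNat + right.toNat) / 2 = left.toNat + ((right + 1 - left).toNat - 1) / 2 := by
    omega
  rw [this]

lemma pvGoB_eq_pvLoopA (timestampList : List Int) (target : Int) :
    ∀ (n : Nat) (left right : Int), (right + 1 - left).toNat ≤ n → 0 ≤ left →
      pvGoB timestampList target left.toNat (right + 1 - left).toNat (pvExit timestampList left)
        = pvLoopA timestampList target left right := by
  intro n
  induction n with
  | zero =>
    intro left right hn _
    have hgt : right < left := by omega
    rw [pvGoB, pvLoopA]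
    simp [show (right + 1 - left).toNat = 0 by omega, not_le.mpr hgt, pvExit]
  | succ n ih =>
    intro left right hn h0
    by_cases hle : left ≤ right
    · have hmid := PySem.Int.floordiv_two_mid_bounds hle
      have hsz : (right + 1 - left).toNat ≠ 0 := by omega
      rw [pvGoB, pvLoopA]
      simp only [if_pos hle, if_neg hsz]
      have hm := pvMid_eq left right h0 hle
      have hv : (PySem.List.pyGet? timestampList (PySem.Int.floordiv (left + right) 2)).getD 0
          = timestampList.getD (left.toNat + ((right + 1 - left).toNat - 1) / 2) 0 := by
        rw [pvGet_nonneg _ _ (by omega), hm, Int.toNat_natCast]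
      rw [← hv]
      split_ifs with h1 h2
      · rfl
      · -- value < target: B's new accumulator is A's eventual timestampList[left'-1]
        set mid := PySem.Int.floordiv (left + right) 2 with hmdef
        have hx : pvExit timestampList (mid + 1)
            = some ((PySem.List.pyGet? timestampList mid).getD 0) := by
          unfold pvExit
          rw [if_neg (by omega)]
          simp
        have ihh := ih (mid + 1) right (by omega) (by omega)
        rw [hx] at ihh
        rw [← ihh]
        congr 1
        · omega
        · omega
      · set mid := PySem.Int.floordiv (left + right) 2 with hmdef
        have ihh := ih left (mid - 1) (by omega) h0
        rw [← ihh]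
        congr 1
        omega
    · have hgt : right < left := by omega
      rw [pvGoB, pvLoopA]
      simp [show (right + 1 - left).toNat = 0 by omega, not_le.mpr hgt, pvExit]

-- ===== VERDICT (by name: the statement is the Claim_ definition above) =====
theorem getMostRecentTimestamp_spec : Claim_equal_getMostRecentTimestamp := by
  intro timestampList target _
  unfold Spec_getMostRecentTimestamp getMostRecentTimestamp getMostRecentTimestamp_alt
  have h := pvGoB_eq_pvLoopA timestampList target
      ((timestampList.length : Int) - 1 + 1 - 0).toNat 0 (timestampList.length - 1) le_rfl le_rfl
  have hs : ((timestampList.length : Int) - 1 + 1 - 0).toNat = timestampList.length := by omega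
  rw [hs] at h
  simpa [pvExit] using h.symm
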